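-- pv_equiv track=rewrite | github.com/zena-hira/aoc_2024 | solutions/aoc_5.py | find_valid_permutation
-- ===== SOURCE A (Python) =====
-- def is_valid(sequence, h):
--     """
--     Check if a sequence satisfies the rules in the dependency graph `h`.
--     """
--     for idx, elem in enumerate(sequence):
--         if elem in h:
--             for dependent in h[elem]:
--                 if dependent in sequence[:idx]:
--                     return False
--     return True
--
-- def find_valid_permutation(order, h):
--     """
--     Use backtracking to find the first valid permutation of the order that satisfies the rules in `h`.
--     """
--     n = len(order)
--     used = [False] * n
--     result = []
--
--     def backtrack(path):
--         if len(path) == n: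
--             result.append(path[:])
--             return True
--
--         for i in range(n):
--             if not used[i]:
--                 path.append(order[i])
--                 if is_valid(path, h):
--                     used[i] = True
--                     if backtrack(path):
--                         return True
--                     used[i] = False
--                 path.pop()
--         return False
--
--     backtrack([])
--     return result[0] if result else None
-- ===== SOURCE B (Python) =====
-- def find_valid_permutation(order, h):
--     """
--     Backtracking with incremental validity: instead of rechecking the whole
--     path each step, only the newly placed element is checked against the set
--     of already-placed elements.
--     """
--     def search(remaining, placed, path):
--         if not remaining:
--             return path
--         for j, elem in enumerate(remaining):
--             if not any(d in placed for d in h.get(elem, ())):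
--                 res = search(remaining[:j] + remaining[j + 1:],
--                              placed | {elem}, path + [elem])
--                 if res is not None:
--                     return res
--         return None
--
--     return search(list(order), set(), [])
-- ===== Notes on version B (the rewrite author's own statement) =====
-- stated objective: alternative
-- what changed: Replaced the full is_valid recheck of the whole path at every backtracking step by an incremental check of only the candidate element's dependents against the set of already-placed elements, recursing on the list of remaining elements instead of a used-flags array.
import Mathlib
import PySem

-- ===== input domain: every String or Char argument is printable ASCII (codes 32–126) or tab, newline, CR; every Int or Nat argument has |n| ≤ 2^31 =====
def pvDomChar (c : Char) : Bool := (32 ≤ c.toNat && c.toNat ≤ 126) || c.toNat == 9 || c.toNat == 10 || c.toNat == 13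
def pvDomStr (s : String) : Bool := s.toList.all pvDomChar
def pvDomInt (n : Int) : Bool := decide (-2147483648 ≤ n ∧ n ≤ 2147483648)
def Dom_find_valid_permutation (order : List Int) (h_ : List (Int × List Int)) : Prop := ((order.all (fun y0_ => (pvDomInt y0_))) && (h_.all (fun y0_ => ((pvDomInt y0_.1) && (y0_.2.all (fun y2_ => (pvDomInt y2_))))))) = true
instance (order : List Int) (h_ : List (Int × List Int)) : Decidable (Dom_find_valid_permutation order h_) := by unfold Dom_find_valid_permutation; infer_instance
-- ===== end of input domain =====

-- ===== PORT A =====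
-- B replaces the full is_valid recheck of the whole path at every node by an incremental
-- check of only the candidate element against the set of already-placed elements.

-- the check the Python inner loop of is_valid performs for one element against its prefix
def isValidCheck (h : PySem.Dict Int (List Int)) (pre : List Int) (e : Int) : Bool :=
  if h.contains e then (h.getD e []).all (fun d => !(pre.contains d)) else true

-- the enumerate loop of is_valid, carrying the prefix sequence[:idx]
def isValidAux (h : PySem.Dict Int (List Int)) : List Int → List Int → Bool
  | _, [] => true
  | pre, e :: rest =>
    if isValidCheck h pre e then isValidAux h (pre ++ [e]) rest else false

def is_valid (sequence : List Int) (h : PySem.Dict Int (List Int)) : Bool :=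
  isValidAux h [] sequence

-- backtrack of A: fuel bounds the recursion depth (order.length + 1 always suffices: each
-- level grows path by one and recursion stops at length order.length); btALoop is the for-loop.
mutual
def btA (order : List Int) (h : PySem.Dict Int (List Int)) :
    Nat → List Bool → List Int → Option (List Int)
  | 0, _, _ => none
  | fuel + 1, used, path =>
    if path.length = order.length then some path
    else btALoop order h fuel used path (List.range order.length)
termination_by fuel used path => (fuel, 0)

def btALoop (order : List Int) (h : PySem.Dict Int (List Int)) :
    Nat → List Bool → List Int → List Nat → Option (List Int)
  | _, _, _, [] => none
  | fuel, used, path, i :: rest =>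
    if used.getD i true then btALoop order h fuel used path rest
    else
      let path' := path ++ [order.getD i 0]
      if is_valid path' h then
        match btA order h fuel (used.set i true) path' with
        | some r => some r
        | none => btALoop order h fuel used path rest
      else btALoop order h fuel used path rest
termination_by fuel used path l => (fuel, l.length + 1)
end

def find_valid_permutation (order : List Int) (h_ : List (Int × List Int)) : Option (List Int) :=
  btA order (PySem.Dict.mk h_) (order.length + 1) (List.replicate order.length false) []

-- ===== PORT B =====
-- 'not any(d in placed for d in h.get(elem, ()))'
def okB (h : PySem.Dict Int (List Int)) (placed : PySem.Set Int) (e : Int) : Bool :=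
  !((h.getD e []).any (fun d => PySem.Set.contains placed d))

-- search of B: recursion on the remaining elements; seen accumulates remaining[:j].
mutual
def btB (h : PySem.Dict Int (List Int)) :
    Nat → PySem.Set Int → List Int → List Int → Option (List Int)
  | 0, _, _, _ => none
  | fuel + 1, placed, path, remaining =>
    if remaining.isEmpty then some path
    else btBLoop h fuel placed path [] remaining
termination_by fuel placed path remaining => (fuel, 0)

def btBLoop (h : PySem.Dict Int (List Int)) :
    Nat → PySem.Set Int → List Int → List Int → List Int → Option (List Int)
  | _, _, _, _, [] => none
  | fuel, placed, path, seen, e :: rest =>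
    if okB h placed e then
      match btB h fuel (PySem.Set.add placed e) (path ++ [e]) (seen ++ rest) with
      | some r => some r
      | none => btBLoop h fuel placed path (seen ++ [e]) rest
    else btBLoop h fuel placed path (seen ++ [e]) rest
termination_by fuel placed path seen l => (fuel, l.length + 1)
end

def find_valid_permutation_alt (order : List Int) (h_ : List (Int × List Int)) : Option (List Int) :=
  btB (PySem.Dict.mk h_) (order.length + 1) PySem.Set.empty [] order

-- ===== PRECONDITION & SPEC =====
def Spec_find_valid_permutation (order : List Int) (h_ : List (Int × List Int)) (out : Option (List Int)) : Prop := out = find_valid_permutation_alt order h_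
instance (order : List Int) (h_ : List (Int × List Int)) (out : Option (List Int)) : Decidable (Spec_find_valid_permutation order h_ out) := by unfold Spec_find_valid_permutation; infer_instance

-- ===== CLAIM (what is proved, stated in full; the proofs are below) =====
def Claim_equal_find_valid_permutation : Prop := ∀ (order : List Int) (h_ : List (Int × List Int)), Dom_find_valid_permutation order h_ → Spec_find_valid_permutation order h_ (find_valid_permutation order h_)

-- ===== LEMMAS AND PROOFS =====

-- the element A's loop would place at index i (none if the index is used)
def fA (order : List Int) (used : List Bool) (i : Nat) : Option Int :=
  if used.getD i true then none else some (order.getD i 0)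

-- appending one element to a path: its validity is the old validity plus the new element's check
lemma isValidAux_append (h : PySem.Dict Int (List Int)) (e : Int) :
    ∀ (l pre : List Int),
      isValidAux h pre (l ++ [e]) = (isValidAux h pre l && isValidCheck h (pre ++ l) e) := by
  intro l
  induction l with
  | nil => intro pre; simp [isValidAux]
  | cons c tl ih =>
    intro pre
    simp only [List.cons_append, isValidAux]
    by_cases hc : isValidCheck h pre c = true
    · simp [hc, ih (pre ++ [c])]
    · simp [Bool.not_eq_true] at hc
      simp [hc]

lemma is_valid_append (h : PySem.Dict Int (List Int)) (path : List Int) (e : Int)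
    (hv : is_valid path h = true) :
    is_valid (path ++ [e]) h = isValidCheck h path e := by
  simp only [is_valid] at hv ⊢
  simpa [hv] using isValidAux_append h e path []

lemma okB_eq_check (h : PySem.Dict Int (List Int)) (placed : PySem.Set Int) (path : List Int) (e : Int)
    (hmem : ∀ x : Int, x ∈ placed ↔ x ∈ path) :
    okB h placed e = isValidCheck h path e := by
  unfold okB isValidCheck
  by_cases hc : h.contains e = true
  · simp [hc, List.all_eq_not_any_not, hmem]
  · simp only [Bool.not_eq_true] at hc
    have h0 : h.getD e [] = [] := PySem.Dict.getD_of_not_contains h [] hc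
    simp [hc, h0]

lemma mem_add_iff (placed : PySem.Set Int) (path : List Int) (e : Int)
    (hmem : ∀ x : Int, x ∈ placed ↔ x ∈ path) :
    ∀ x : Int, x ∈ PySem.Set.add placed e ↔ x ∈ path ++ [e] := by
  intro x
  simp [PySem.Set.mem_add, hmem]

-- fA is unchanged at indices other than i after setting used[i]
lemma fA_set_ne (order : List Int) (used : List Bool) (i j : Nat) (hj : j ≠ i) :
    fA order (used.set i true) j = fA order used j := by
  simp [fA, List.getD_eq_getElem?_getD, List.getElem?_set_ne (Ne.symm hj)]

lemma fA_set_self (order : List Int) (used : List Bool) (i : Nat) (hi : i < used.length) :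
    fA order (used.set i true) i = none := by
  simp [fA, List.getD_eq_getElem?_getD, List.getElem?_set_self hi]

-- the loop equivalence
lemma loop_eq (order : List Int) (h : PySem.Dict Int (List Int)) (fuel : Nat)
    (IH : ∀ (used : List Bool) (path : List Int) (placed : PySem.Set Int),
        used.length = order.length →
        path.length + ((List.range order.length).filterMap (fA order used)).length = order.length →
        is_valid path h = true →
        (∀ x : Int, x ∈ placed ↔ x ∈ path) →
        btA order h fuel used path
          = btB h fuel placed path ((List.range order.length).filterMap (fA order used))) :
    ∀ (l pre : List Nat) (used : List Bool) (path : List Int) (placed : PySem.Set Int),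
      used.length = order.length →
      List.range order.length = pre ++ l →
      is_valid path h = true →
      (∀ x : Int, x ∈ placed ↔ x ∈ path) →
      path.length + (pre.filterMap (fA order used)).length + (l.filterMap (fA order used)).length
        = order.length →
      btALoop order h fuel used path l
        = btBLoop h fuel placed path (pre.filterMap (fA order used)) (l.filterMap (fA order used)) := by
  intro l
  induction l with
  | nil => intro pre used path placed _ _ _ _ _; simp [btALoop, btBLoop]
  | cons i rest ihl =>
    intro pre used path placed hlen hrange hv hmem hinv
    have hnodup : (List.range order.length).Nodup := List.nodup_range
    rw [hrange] at hnodup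
    have hipre : i ∉ pre := by
      intro hmem'
      exact (List.disjoint_of_nodup_append hnodup hmem') List.mem_cons_self
    have hirest : i ∉ rest := by
      have := (List.nodup_append.mp hnodup).2.1
      simpa using (List.nodup_cons.mp this).1
    have hin : i < order.length := by
      have : i ∈ List.range order.length := by rw [hrange]; simp
      simpa using this
    by_cases hu : used.getD i true = true
    · -- index already used: A skips; fA i = none so B's list is unchanged
      have hu2 : used[i]?.getD true = true := by
        simpa [List.getD_eq_getElem?_getD] using hu
      have hf : fA order used i = none := by simp [fA, hu2]
      have step : btALoop order h fuel used path (i :: rest)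
          = btALoop order h fuel used path rest := by
        rw [btALoop]; simp [hu2]
      rw [step]
      have := ihl (pre ++ [i]) used path placed hlen (by simpa using hrange) hv hmem
        (by simp only [List.filterMap_append, List.filterMap_cons, hf] at hinv ⊢
            simp at hinv ⊢; omega)
      simpa [hf] using this
    · have hu' : used.getD i true = false := by simpa using hu
      have hu2 : used[i]?.getD true = false := by
        simpa [List.getD_eq_getElem?_getD] using hu'
      set e := order.getD i 0 with he
      have he2 : order[i]?.getD 0 = e := by simp [he, List.getD_eq_getElem?_getD]
      have hf : fA order used i = some e := by simp [fA, hu2, he2]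
      have hfilter : (i :: rest).filterMap (fA order used)
          = e :: rest.filterMap (fA order used) := by simp [hf]
      have hlen2 : path.length + (pre.filterMap (fA order used)).length
          + ((rest.filterMap (fA order used)).length + 1) = order.length := by
        rw [hfilter] at hinv; simpa using hinv
      have hcheck : okB h placed e = is_valid (path ++ [e]) h := by
        rw [is_valid_append h path e hv, okB_eq_check h placed path e hmem]
      -- the continue-branch (element skipped or recursion failed) on both sides
      have hcont := ihl (pre ++ [i]) used path placed hlen (by simpa using hrange) hv hmem
        (by simp only [List.filterMap_append, List.filterMap_cons, hf] at hinv ⊢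
            simp at hinv ⊢; omega)
      have hseen : (pre ++ [i]).filterMap (fA order used)
          = pre.filterMap (fA order used) ++ [e] := by simp [hf]
      rw [hseen] at hcont
      by_cases hval : is_valid (path ++ [e]) h = true
      · -- both sides recurse
        have hrec : btA order h fuel (used.set i true) (path ++ [e])
            = btB h fuel (PySem.Set.add placed e) (path ++ [e])
                (pre.filterMap (fA order used) ++ rest.filterMap (fA order used)) := by
          have hcongr : (List.range order.length).filterMap (fA order (used.set i true))
              = pre.filterMap (fA order used) ++ rest.filterMap (fA order used) := by
            rw [hrange]
            rw [List.filterMap_append, List.filterMap_cons,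
              fA_set_self order used i (by omega)]
            rw [List.filterMap_congr (fun j hj => fA_set_ne order used i j (by rintro rfl; exact hipre hj)),
              List.filterMap_congr (fun j hj => fA_set_ne order used i j (by rintro rfl; exact hirest hj))]
          apply Eq.trans (IH (used.set i true) (path ++ [e]) (PySem.Set.add placed e)
            (by simpa using hlen)
            (by rw [hcongr]
                simp only [List.length_append, List.length_cons, List.length_nil]
                omega)
            hval (mem_add_iff placed path e hmem))
          rw [hcongr]
        have stepA : btALoop order h fuel used path (i :: rest)
            = match btA order h fuel (used.set i true) (path ++ [e]) with
              | some r => some r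
              | none => btALoop order h fuel used path rest := by
          rw [btALoop]; simp [hu2, he2, hval]
        have stepB : btBLoop h fuel placed path (pre.filterMap (fA order used))
              (e :: rest.filterMap (fA order used))
            = match btB h fuel (PySem.Set.add placed e) (path ++ [e])
                  (pre.filterMap (fA order used) ++ rest.filterMap (fA order used)) with
              | some r => some r
              | none => btBLoop h fuel placed path (pre.filterMap (fA order used) ++ [e])
                  (rest.filterMap (fA order used)) := by
          rw [btBLoop, if_pos (by rw [hcheck]; exact hval)]
        rw [hfilter, stepA, stepB, hrec]
        cases btB h fuel (PySem.Set.add placed e) (path ++ [e])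
            (pre.filterMap (fA order used) ++ rest.filterMap (fA order used)) with
        | some r => rfl
        | none => exact hcont
      · -- candidate invalid: both sides skip it
        have hvf : is_valid (path ++ [e]) h = false := by simpa using hval
        have stepA : btALoop order h fuel used path (i :: rest)
            = btALoop order h fuel used path rest := by
          rw [btALoop]; simp [hu2, he2, hvf]
        have stepB : btBLoop h fuel placed path (pre.filterMap (fA order used))
              (e :: rest.filterMap (fA order used))
            = btBLoop h fuel placed path (pre.filterMap (fA order used) ++ [e])
                (rest.filterMap (fA order used)) := by
          rw [btBLoop, if_neg (by simp [hcheck, hvf])]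
        rw [hfilter, stepA, stepB]
        exact hcont

lemma bt_eq (order : List Int) (h : PySem.Dict Int (List Int)) :
    ∀ (fuel : Nat) (used : List Bool) (path : List Int) (placed : PySem.Set Int),
      used.length = order.length →
      path.length + ((List.range order.length).filterMap (fA order used)).length = order.length →
      is_valid path h = true →
      (∀ x : Int, x ∈ placed ↔ x ∈ path) →
      btA order h fuel used path
        = btB h fuel placed path ((List.range order.length).filterMap (fA order used)) := by
  intro fuel
  induction fuel with
  | zero => intro used path placed _ _ _ _; simp [btA, btB]
  | succ fuel ih =>
    intro used path placed hlen hinv hv hmem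
    rw [btA, btB]
    by_cases hp : path.length = order.length
    · have h0 : ((List.range order.length).filterMap (fA order used)).length = 0 := by omega
      have he : (List.range order.length).filterMap (fA order used) = [] := by
        simpa using h0
      simp [hp, he]
    · have hne : ((List.range order.length).filterMap (fA order used)) ≠ [] := by
        intro he; rw [he] at hinv; simp at hinv; omega
      rw [if_neg hp, if_neg (by simpa [List.isEmpty_iff] using hne)]
      have := loop_eq order h fuel ih (List.range order.length) [] used path placed hlen
        (by simp) hv hmem (by simpa using hinv)
      simpa using this

lemma filterMap_fA_replicate (order : List Int) :
    (List.range order.length).filterMap (fA order (List.replicate order.length false)) = order := by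
  have h1 : ∀ i ∈ List.range order.length,
      fA order (List.replicate order.length false) i = some (order.getD i 0) := by
    intro i hi
    simp only [List.mem_range] at hi
    simp [fA, List.getD_eq_getElem?_getD, hi]
  rw [List.filterMap_congr h1]
  have h2 : (fun i => some (order.getD i 0)) = some ∘ (fun i => order.getD i 0) := rfl
  rw [h2, List.filterMap_eq_map]
  apply List.ext_getElem (by simp)
  intro i hi1 hi2
  simp [List.getD_eq_getElem?_getD, List.getElem?_eq_getElem hi2]

theorem fvp_eq (order : List Int) (h_ : List (Int × List Int)) :
    find_valid_permutation order h_ = find_valid_permutation_alt order h_ := by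
  unfold find_valid_permutation find_valid_permutation_alt
  have h0 := bt_eq order (PySem.Dict.mk h_) (order.length + 1)
      (List.replicate order.length false) [] PySem.Set.empty
      (by simp)
      (by simp [filterMap_fA_replicate order])
      (by simp [is_valid, isValidAux])
      (by intro x; simp [PySem.Set.empty])
  rw [h0, filterMap_fA_replicate order]

-- ===== VERDICT (by name: the statement is the Claim_ definition above) =====
theorem find_valid_permutation_spec : Claim_equal_find_valid_permutation := by
  intro order h_ _
  unfold Spec_find_valid_permutation
  exact fvp_eq order h_
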